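-- pv_equiv track=rewrite | github.com/dhamodhar1142/clinical-outcomes-explorer | src/services/application_service.py | split_column_validation_warnings
-- ===== SOURCE A (Python) =====
-- from typing import Any
--
-- def split_column_validation_warnings(column_validation: dict[str, Any]) -> tuple[str | None, list[str]]:
--     warnings = [str(item) for item in column_validation.get('warnings', []) if str(item).strip()]
--     empty_column_warning = None
--     remaining: list[str] = []
--     for warning in warnings:
--         if empty_column_warning is None and 'completely empty' in warning.lower():
--             empty_column_warning = warning
--         else:
--             remaining.append(warning)
--     return empty_column_warning, remaining
-- ===== SOURCE B (Python) =====
-- def split_column_validation_warnings(column_validation):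
--     warnings = [str(item) for item in column_validation.get('warnings', []) if str(item).strip()]
--     idx = next((i for i, w in enumerate(warnings) if 'completely empty' in w.lower()), None)
--     if idx is None:
--         return None, warnings
--     return warnings[idx], warnings[:idx] + warnings[idx + 1:]
-- ===== Notes on version B (the rewrite author's own statement) =====
-- stated objective: simpler
-- what changed: Replaces the stateful found-flag loop with per-element appends by a locate-then-splice: find the index of the first 'completely empty' warning and return it together with the list spliced around that index.
import Mathlib
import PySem

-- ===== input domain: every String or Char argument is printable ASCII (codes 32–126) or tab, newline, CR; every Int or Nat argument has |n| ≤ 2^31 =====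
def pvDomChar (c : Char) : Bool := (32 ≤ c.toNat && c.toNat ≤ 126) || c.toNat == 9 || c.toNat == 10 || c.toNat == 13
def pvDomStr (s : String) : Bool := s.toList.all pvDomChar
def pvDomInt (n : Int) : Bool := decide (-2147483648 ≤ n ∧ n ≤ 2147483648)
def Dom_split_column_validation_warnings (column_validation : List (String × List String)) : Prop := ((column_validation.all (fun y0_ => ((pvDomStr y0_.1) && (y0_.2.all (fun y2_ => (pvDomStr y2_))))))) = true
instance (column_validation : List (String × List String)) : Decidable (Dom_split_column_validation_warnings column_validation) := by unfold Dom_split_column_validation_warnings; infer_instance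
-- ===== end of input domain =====

-- B replaces A's stateful found-flag loop with locate-then-splice; objective: simpler.

-- ===== PORT A =====
-- the per-element test 'completely empty' in warning.lower()
def pvHit (w : String) : Bool := PySem.Str.isIn "completely empty" (PySem.Str.lower w)

def split_column_validation_warnings (column_validation : List (String × List String)) : Option String × List String :=
  let warnings := ((PySem.Dict.mk column_validation).getD "warnings" []).filter
    (fun item => PySem.Str.strip item != "")
  warnings.foldl
    (fun (st : Option String × List String) warning =>
      if st.1 = none ∧ pvHit warning then (some warning, st.2)
      else (st.1, st.2 ++ [warning]))
    (none, [])

-- ===== PORT B =====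
def split_column_validation_warnings_alt (column_validation : List (String × List String)) : Option String × List String :=
  let warnings := ((PySem.Dict.mk column_validation).getD "warnings" []).filter
    (fun item => PySem.Str.strip item != "")
  match warnings.findIdx? pvHit with
  | none => (none, warnings)
  | some i => (warnings[i]?, warnings.take i ++ warnings.drop (i + 1))

-- ===== PRECONDITION & SPEC =====
def Spec_split_column_validation_warnings (column_validation : List (String × List String)) (out : Option String × List String) : Prop := out = split_column_validation_warnings_alt column_validation
instance (column_validation : List (String × List String)) (out : Option String × List String) : Decidable (Spec_split_column_validation_warnings column_validation out) := by unfold Spec_split_column_validation_warnings; infer_instance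

-- ===== CLAIM (what is proved, stated in full; the proofs are below) =====
def Claim_equal_split_column_validation_warnings : Prop := ∀ (column_validation : List (String × List String)), Dom_split_column_validation_warnings column_validation → Spec_split_column_validation_warnings column_validation (split_column_validation_warnings column_validation)

-- ===== LEMMAS AND PROOFS =====

-- once the flag is set, A's loop only appends
theorem pv_foldl_some (l : List String) (x : String) (acc : List String) :
    l.foldl (fun (st : Option String × List String) warning =>
        if st.1 = none ∧ pvHit warning then (some warning, st.2)
        else (st.1, st.2 ++ [warning])) (some x, acc)
      = (some x, acc ++ l) := by
  induction l generalizing acc with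
  | nil => simp
  | cons w l ih => simp [ih]

-- A's loop from the unset state equals B's locate-then-splice, modulo the prefix acc
theorem pv_foldl_none (l : List String) (acc : List String) :
    l.foldl (fun (st : Option String × List String) warning =>
        if st.1 = none ∧ pvHit warning then (some warning, st.2)
        else (st.1, st.2 ++ [warning])) (none, acc)
      = match l.findIdx? pvHit with
        | none => (none, acc ++ l)
        | some i => (l[i]?, acc ++ (l.take i ++ l.drop (i + 1))) := by
  induction l generalizing acc with
  | nil => simp
  | cons w l ih =>
    by_cases hw : pvHit w
    · simp [hw, List.findIdx?_cons, pv_foldl_some]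
    · rw [List.foldl_cons, if_neg (by simp [hw]), ih]
      simp only [List.findIdx?_cons, hw, Bool.false_eq_true, if_false]
      cases h : l.findIdx? pvHit with
      | none => simp
      | some i => simp [List.take_succ_cons, List.drop_succ_cons]

-- ===== VERDICT (by name: the statement is the Claim_ definition above) =====
theorem split_column_validation_warnings_spec : Claim_equal_split_column_validation_warnings := by
  intro cv _
  unfold Spec_split_column_validation_warnings
  unfold split_column_validation_warnings split_column_validation_warnings_alt
  rw [pv_foldl_none]
  cases h : (((PySem.Dict.mk cv).getD "warnings" []).filter
      (fun item => PySem.Str.strip item != "")).findIdx? pvHit <;> simp [h]
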